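-- pv_equiv track=rewrite | github.com/ywatanabe1989/scitex-python | src/mcp_servers/scitex-io-translator/translators/template_translator.py | _wrap_in_main
-- ===== SOURCE A (Python) =====
-- def _wrap_in_main(code: str) -> str:
--     """Wrap code in main function."""
--     lines = code.split("\n")
--
--     # Find where executable code starts
--     function_lines = []
--     main_lines = []
--     in_main = False
--
--     for line in lines:
--         if (
--             not in_main
--             and line.strip()
--             and not line.strip().startswith("#")
--             and not line.strip().startswith("def ")
--             and not line.strip().startswith("class ")
--             and not line.strip().startswith("@")
--         ):
--             in_main = True
--
--         if in_main:
--             main_lines.append("    " + line if line.strip() else line)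
--         else:
--             function_lines.append(line)
--
--     # Build result
--     result = "\n".join(function_lines)
--     if function_lines and function_lines[-1].strip():
--         result += "\n\n"
--
--     result += "def main():\n"
--     result += '    """Main function."""\n'
--     result += "\n".join(main_lines)
--     result += "\n    return 0\n"
--
--     return result
-- ===== SOURCE B (Python) =====
-- def _wrap_in_main(code: str) -> str:
--     """Wrap code in main function."""
--     lines = code.split("\n")
--     # Right-fold partition: scan the lines in REVERSE; an executable line
--     # absorbs every line still pending above it into the main body, so the
--     # header ends up being exactly the lines before the first executable one.
--     rh = []  # header lines, in reverse order
--     rb = []  # body lines, in reverse order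
--     for line in reversed(lines):
--         s = line.strip()
--         if s and not s.startswith(("#", "def ", "class ", "@")):
--             rb.extend(rh)
--             rh = []
--             rb.append(line)
--         else:
--             rh.append(line)
--     function_lines = rh[::-1]
--     main_lines = ["    " + l if l.strip() else l for l in rb[::-1]]
--     result = "\n".join(function_lines)
--     if function_lines and function_lines[-1].strip():
--         result += "\n\n"
--     return (result + "def main():\n" + '    """Main function."""\n'
--             + "\n".join(main_lines) + "\n    return 0\n")
-- ===== Notes on version B (the rewrite author's own statement) =====
-- stated objective: alternative
-- what changed: Replaced A's forward scan with a latched in_main flag by a reverse-order right-fold partition in which an executable line absorbs all still-pending lines into the main body; the two reversed accumulators are flipped at the end and the main part indented by a comprehension.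
import Mathlib
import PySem

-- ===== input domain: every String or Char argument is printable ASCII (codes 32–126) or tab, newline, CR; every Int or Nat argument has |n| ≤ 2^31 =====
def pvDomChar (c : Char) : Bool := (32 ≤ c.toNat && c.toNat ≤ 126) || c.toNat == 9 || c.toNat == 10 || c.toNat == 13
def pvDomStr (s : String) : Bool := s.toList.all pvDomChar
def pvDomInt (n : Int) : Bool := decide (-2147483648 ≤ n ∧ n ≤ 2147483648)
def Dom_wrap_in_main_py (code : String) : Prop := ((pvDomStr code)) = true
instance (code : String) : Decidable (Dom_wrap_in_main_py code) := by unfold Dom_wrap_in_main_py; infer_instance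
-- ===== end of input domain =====

-- B replaces A's forward latched-flag loop by a reverse-order right-fold partition
-- (an executable line absorbs all pending lines into the body); objective: alternative.

-- ===== PORT A =====
-- the condition that flips `in_main` (A tests it on line.strip(), four separate startswith checks)
def isExecLine (line : List Char) : Bool :=
  decide (PySem.Chars.strip line ≠ []) &&
  !PySem.Chars.startswith (PySem.Chars.strip line) "#".toList &&
  !PySem.Chars.startswith (PySem.Chars.strip line) "def ".toList &&
  !PySem.Chars.startswith (PySem.Chars.strip line) "class ".toList &&
  !PySem.Chars.startswith (PySem.Chars.strip line) "@".toList

-- "    " + line if line.strip() else line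
def indentLine (line : List Char) : List Char :=
  if PySem.Chars.strip line ≠ [] then "    ".toList ++ line else line

-- A's for-loop over lines with state (function_lines, main_lines, in_main)
def wrapLoopA : List (List Char) → List (List Char) → List (List Char) → Bool →
    List (List Char) × List (List Char)
  | [], fl, ml, _ => (fl, ml)
  | line :: rest, fl, ml, inMain =>
      let inMain' := if !inMain && isExecLine line then true else inMain
      if inMain' then wrapLoopA rest fl (ml ++ [indentLine line]) inMain'
      else wrapLoopA rest (fl ++ [line]) ml inMain'

def wrap_in_main_py (code : String) : String :=
  let lines := PySem.Chars.splitOn code.toList "\n".toList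
  let (fl, ml) := wrapLoopA lines [] [] false
  let result := PySem.Chars.join "\n".toList fl
  let result :=
    if fl ≠ [] ∧ PySem.Chars.strip (fl.getLastD []) ≠ [] then result ++ "\n\n".toList
    else result
  String.ofList (result ++ "def main():\n".toList ++ "    \"\"\"Main function.\"\"\"\n".toList ++
    PySem.Chars.join "\n".toList ml ++ "\n    return 0\n".toList)

-- ===== PORT B =====
-- B's test: s and not s.startswith(("#", "def ", "class ", "@"))  (tuple = any of the prefixes)
def isExecLineB (line : List Char) : Bool :=
  decide (PySem.Chars.strip line ≠ []) &&
  !(PySem.Chars.startswith (PySem.Chars.strip line) "#".toList ||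
    PySem.Chars.startswith (PySem.Chars.strip line) "def ".toList ||
    PySem.Chars.startswith (PySem.Chars.strip line) "class ".toList ||
    PySem.Chars.startswith (PySem.Chars.strip line) "@".toList)

-- one step of B's reverse loop over state (rh, rb):
-- exec line: rb.extend(rh); rh = []; rb.append(line)   else: rh.append(line)
def stepB (st : List (List Char) × List (List Char)) (line : List Char) :
    List (List Char) × List (List Char) :=
  if isExecLineB line then ([], st.2 ++ st.1 ++ [line]) else (st.1 ++ [line], st.2)

def wrap_in_main_py_alt (code : String) : String :=
  let lines := PySem.Chars.splitOn code.toList "\n".toList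
  let (rh, rb) := lines.reverse.foldl stepB ([], [])
  let fl := rh.reverse
  let ml := rb.reverse.map indentLine
  let result := PySem.Chars.join "\n".toList fl
  let result :=
    if fl ≠ [] ∧ PySem.Chars.strip (fl.getLastD []) ≠ [] then result ++ "\n\n".toList
    else result
  String.ofList (result ++ "def main():\n".toList ++ "    \"\"\"Main function.\"\"\"\n".toList ++
    PySem.Chars.join "\n".toList ml ++ "\n    return 0\n".toList)

-- ===== PRECONDITION & SPEC =====
def Spec_wrap_in_main_py (code : String) (out : String) : Prop := out = wrap_in_main_py_alt code
instance (code : String) (out : String) : Decidable (Spec_wrap_in_main_py code out) := by unfold Spec_wrap_in_main_py; infer_instance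

-- ===== CLAIM (what is proved, stated in full; the proofs are below) =====
def Claim_equal_wrap_in_main_py : Prop := ∀ (code : String), Dom_wrap_in_main_py code → Spec_wrap_in_main_py code (wrap_in_main_py code)

-- ===== LEMMAS AND PROOFS =====
theorem isExecLineB_eq (line : List Char) : isExecLineB line = isExecLine line := by
  simp [isExecLineB, isExecLine, Bool.not_or, Bool.and_assoc]

-- once in_main is set, every remaining line goes (indented) to main_lines
theorem wrapLoopA_true (lines : List (List Char)) :
    ∀ fl ml, wrapLoopA lines fl ml true = (fl, ml ++ lines.map indentLine) := by
  induction lines with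
  | nil => simp [wrapLoopA]
  | cons h t ih => intro fl ml; simp [wrapLoopA, ih]

-- A's loop from in_main = false splits at the first executable line
theorem wrapLoopA_false (lines : List (List Char)) :
    ∀ fl ml, wrapLoopA lines fl ml false =
      (fl ++ lines.take ((lines.findIdx? isExecLine).getD lines.length),
       ml ++ (lines.drop ((lines.findIdx? isExecLine).getD lines.length)).map indentLine) := by
  induction lines with
  | nil => simp [wrapLoopA]
  | cons h t ih =>
    intro fl ml
    by_cases hp : isExecLine h
    · simp [wrapLoopA, hp, wrapLoopA_true, List.findIdx?_cons]
    · have hk : (((h :: t).findIdx? isExecLine).getD (t.length + 1)) =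
          ((t.findIdx? isExecLine).getD t.length) + 1 := by
        cases hfi : t.findIdx? isExecLine <;> simp [List.findIdx?_cons, hp, hfi]
      simp [wrapLoopA, hp, ih, hk]

-- B's reverse right-fold also splits at the first executable line (reversed accumulators)
theorem foldB_spec (lines : List (List Char)) :
    List.foldr (fun x y => stepB y x) ([], []) lines =
      ((lines.take ((lines.findIdx? isExecLine).getD lines.length)).reverse,
       (lines.drop ((lines.findIdx? isExecLine).getD lines.length)).reverse) := by
  induction lines with
  | nil => simp
  | cons h t ih =>
    rw [List.foldr_cons, ih]
    by_cases hp : isExecLine h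
    · have hrev : (t.drop ((t.findIdx? isExecLine).getD t.length)).reverse ++
          (t.take ((t.findIdx? isExecLine).getD t.length)).reverse = t.reverse := by
        rw [← List.reverse_append, List.take_append_drop]
      simp [stepB, isExecLineB_eq, hp, List.findIdx?_cons, hrev]
    · have hk : (((h :: t).findIdx? isExecLine).getD (t.length + 1)) =
          ((t.findIdx? isExecLine).getD t.length) + 1 := by
        cases hfi : t.findIdx? isExecLine <;> simp [List.findIdx?_cons, hp, hfi]
      simp [stepB, isExecLineB_eq, hp, hk]

-- ===== VERDICT (by name: the statement is the Claim_ definition above) =====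
theorem wrap_in_main_py_spec : Claim_equal_wrap_in_main_py := by
  intro code _
  unfold Spec_wrap_in_main_py wrap_in_main_py wrap_in_main_py_alt
  simp [wrapLoopA_false, foldB_spec]
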